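-- pv_equiv track=rewrite | github.com/Cbkhare/Codes | CodeForces_992_A.py | bazinga
-- ===== SOURCE A (Python) =====
-- def bazinga(b):
--     c = 0
--     t = 0
--     for i in b:
--         if i!=0:
--             mz = -1*(i+c)
--             c+=mz
--             if mz!=0:
--                 t+=1
--     return t
-- ===== SOURCE B (Python) =====
-- def bazinga(b):
--     nz = [x for x in b if x != 0]
--     return (1 if nz else 0) + sum(1 for u, v in zip(nz, nz[1:]) if u != v)
-- ===== Notes on version B (the rewrite author's own statement) =====
-- stated objective: alternative
-- what changed: A's stateful single pass with an arithmetic accumulator is replaced by two staged passes with no running state: filter out zeros, then count unequal adjacent pairs of the filtered list via zip(nz, nz[1:]) and add 1 for the first nonzero element.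
import Mathlib
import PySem

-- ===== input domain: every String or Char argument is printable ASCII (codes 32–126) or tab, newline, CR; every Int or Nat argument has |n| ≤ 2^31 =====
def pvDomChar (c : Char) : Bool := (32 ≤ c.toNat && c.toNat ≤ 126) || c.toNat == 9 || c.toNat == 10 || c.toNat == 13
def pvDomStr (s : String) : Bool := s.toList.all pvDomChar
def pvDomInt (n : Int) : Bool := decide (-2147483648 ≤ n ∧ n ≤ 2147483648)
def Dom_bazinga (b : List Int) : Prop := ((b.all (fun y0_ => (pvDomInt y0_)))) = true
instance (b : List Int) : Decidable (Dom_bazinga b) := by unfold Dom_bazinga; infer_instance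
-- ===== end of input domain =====

-- B replaces A's stateful accumulator pass by two staged passes: filter out zeros, then count unequal adjacent pairs (zip with the tail) plus one for the first nonzero; same O(n).


-- ===== PORT A =====
-- step of A's loop body: state (c, t)
def bazingaStepA (s : Int × Int) (i : Int) : Int × Int :=
  if i ≠ 0 then
    let mz := -1 * (i + s.1)
    let c := s.1 + mz
    if mz ≠ 0 then (c, s.2 + 1) else (c, s.2)
  else s

def bazinga (b : List Int) : Int :=
  (b.foldl bazingaStepA (0, 0)).2

-- ===== PORT B =====
-- Source B: nz = [x for x in b if x != 0]; (1 if nz else 0) + sum over zip(nz, nz[1:]) of unequal pairs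
def bazingaPairSum (nz : List Int) : Int :=
  ((nz.zip nz.tail).map (fun p => if p.1 ≠ p.2 then (1 : Int) else 0)).sum

def bazinga_alt (b : List Int) : Int :=
  let nz := b.filter (fun x => decide (x ≠ 0))
  (if nz.isEmpty then 0 else 1) + bazingaPairSum nz

-- ===== PRECONDITION & SPEC =====
def Spec_bazinga (b : List Int) (out : Int) : Prop := out = bazinga_alt b
instance (b : List Int) (out : Int) : Decidable (Spec_bazinga b out) := by unfold Spec_bazinga; infer_instance

-- ===== CLAIM (what is proved, stated in full; the proofs are below) =====
def Claim_equal_bazinga : Prop := ∀ (b : List Int), Dom_bazinga b → Spec_bazinga b (bazinga b)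

-- ===== LEMMAS AND PROOFS =====

-- A's step ignores zeros, so A's fold over b equals A's fold over the zero-free list.
theorem foldA_filter (b : List Int) (s : Int × Int) :
    b.foldl bazingaStepA s = (b.filter (fun x => decide (x ≠ 0))).foldl bazingaStepA s := by
  induction b generalizing s with
  | nil => rfl
  | cons i rest ih =>
      by_cases hi : i = 0
      · subst hi
        simp [List.filter, bazingaStepA, ih]
      · simp [List.filter, hi, List.foldl, ih]

-- On a zero-free list, A's fold from state (-v, t) adds the pair count of v :: l.
theorem foldA_pairSum (l : List Int) (hl : ∀ x ∈ l, x ≠ 0) :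
    ∀ (v t : Int), (l.foldl bazingaStepA (-v, t)).2 = t + bazingaPairSum (v :: l) := by
  induction l with
  | nil => intro v t; simp [bazingaPairSum]
  | cons i rest ih =>
      intro v t
      have hi : i ≠ 0 := hl i (List.mem_cons_self ..)
      have hrest : ∀ x ∈ rest, x ≠ 0 := fun x hx => hl x (List.mem_cons_of_mem _ hx)
      have hstate : -v + -1 * (i + -v) = -i := by ring
      have hps : bazingaPairSum (v :: i :: rest)
          = (if v ≠ i then (1 : Int) else 0) + bazingaPairSum (i :: rest) := by
        simp [bazingaPairSum, List.zip, ne_eq]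
      by_cases hvi : i = v
      · subst hvi
        have hmz : ¬ (-1 * (i + -i) ≠ 0) := by omega
        simp only [List.foldl, bazingaStepA, hi, ne_eq, not_false_iff, if_pos, if_neg hmz]
        rw [hstate, ih hrest i t, hps, if_neg (by omega : ¬ i ≠ i)]
        ring
      · have hmz : -1 * (i + -v) ≠ 0 := by omega
        simp only [List.foldl, bazingaStepA, hi, ne_eq, not_false_iff, if_pos, hmz]
        rw [hstate, ih hrest i (t + 1), hps]
        have : v ≠ i := fun h => hvi h.symm
        rw [if_pos this]; ring

-- ===== VERDICT (by name: the statement is the Claim_ definition above) =====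
theorem bazinga_spec : Claim_equal_bazinga := by
  intro b _
  unfold Spec_bazinga bazinga bazinga_alt
  rw [foldA_filter]
  have hnzall : ∀ x ∈ b.filter (fun x => decide (x ≠ 0)), x ≠ 0 :=
    fun x hx => by simpa using (List.mem_filter.mp hx).2
  generalize b.filter (fun x => decide (x ≠ 0)) = nz at hnzall ⊢
  cases nz with
  | nil => simp [bazingaPairSum]
  | cons i rest =>
      have hi : i ≠ 0 := hnzall i (List.mem_cons_self ..)
      have hrest : ∀ x ∈ rest, x ≠ 0 := fun x hx => hnzall x (List.mem_cons_of_mem _ hx)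
      have hmz : -1 * (i + 0) ≠ 0 := by omega
      simp only [List.foldl, bazingaStepA, hi, ne_eq, not_false_iff, if_pos, hmz]
      have h0 : (0 : Int) + -1 * (i + 0) = -i := by ring
      rw [h0, foldA_pairSum rest hrest i (0 + 1)]
      simp [List.isEmpty]
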